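-- pv_equiv track=rewrite | github.com/anupyadav27/threat-engine | engines/secops/scanner_engine/azure_scanner/arm_logic_implementations.py | _check_resource_property_order
-- ===== SOURCE A (Python) =====
-- def _check_resource_property_order(resource):
--     """
--     Check if a single resource has properties in the recommended order.
--
--     Args:
--         resource: Raw resource dictionary from ARM template
--
--     Returns:
--         bool: True if properties are not in recommended order, False otherwise
--     """
--     # Define the recommended order
--     recommended_order = [
--         'type',
--         'apiVersion',
--         'name',
--         'location',
--         'dependsOn',
--         'properties',
--         'resources'
--     ]
--
--     # Get the actual order of properties in this resource
--     actual_properties = list(resource.keys())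
--
--     # Filter to only include properties that are in our recommended list
--     present_recommended = []
--     for prop in actual_properties:
--         if prop in recommended_order:
--             present_recommended.append(prop)
--
--     # Check if the present recommended properties are in the correct order
--     expected_order = []
--     for prop in recommended_order:
--         if prop in present_recommended:
--             expected_order.append(prop)
--
--     # Compare actual order vs expected order
--     if present_recommended != expected_order:
--         return True  # Properties are not in recommended order
--
--     return False  # Properties are in correct order
-- ===== SOURCE B (Python) =====
-- def _check_resource_property_order(resource):
--     """Single pass: walk the resource keys, tracking the recommended-order index
--     of the last recommended key seen; report True on the first out-of-order key."""
--     recommended_order = [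
--         'type',
--         'apiVersion',
--         'name',
--         'location',
--         'dependsOn',
--         'properties',
--         'resources'
--     ]
--     prev = -1
--     for prop in resource:
--         if prop in recommended_order:
--             i = recommended_order.index(prop)
--             if i <= prev:
--                 return True
--             prev = i
--     return False
-- ===== Notes on version B (the rewrite author's own statement) =====
-- stated objective: simpler
-- what changed: B makes one pass over the keys tracking the last seen recommended-order index and returns True at the first out-of-order key, instead of building the filtered list and a rebuilt canonical expected_order list and comparing them.
import Mathlib
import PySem

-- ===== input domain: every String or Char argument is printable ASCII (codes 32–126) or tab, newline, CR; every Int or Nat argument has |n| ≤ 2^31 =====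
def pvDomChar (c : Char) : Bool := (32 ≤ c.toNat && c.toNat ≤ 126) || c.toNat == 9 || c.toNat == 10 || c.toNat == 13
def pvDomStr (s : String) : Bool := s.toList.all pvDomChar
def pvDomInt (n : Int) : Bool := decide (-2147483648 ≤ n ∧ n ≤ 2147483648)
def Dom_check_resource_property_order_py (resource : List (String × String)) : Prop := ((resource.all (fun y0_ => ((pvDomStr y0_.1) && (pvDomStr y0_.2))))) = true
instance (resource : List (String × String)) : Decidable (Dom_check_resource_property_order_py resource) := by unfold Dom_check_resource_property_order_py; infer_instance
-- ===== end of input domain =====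

-- B replaces A's two filtering passes and list comparison by a single pass over the keys
-- tracking the last seen recommended-order index (objective: simpler).

-- ===== PORT A =====
def check_resource_property_order_py (resource : List (String × String)) : Bool :=
  let recommended_order : List String :=
    ["type", "apiVersion", "name", "location", "dependsOn", "properties", "resources"]
  -- list(resource.keys()): first occurrences of the keys, in insertion order
  let actual_properties : List String := PySem.List.dedup (resource.map Prod.fst)
  let present_recommended : List String :=
    actual_properties.foldl (fun acc prop => if prop ∈ recommended_order then acc ++ [prop] else acc) []
  let expected_order : List String :=
    recommended_order.foldl (fun acc prop => if prop ∈ present_recommended then acc ++ [prop] else acc) []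
  if present_recommended ≠ expected_order then true else false

-- ===== PORT B =====
-- the for-loop of Source B with early return: prev is the running last index, returns at the first violation
def pvGoB (rec : List String) (prev : Int) : List String → Bool
  | [] => false
  | prop :: rest =>
    if prop ∈ rec then
      -- recommended_order.index(prop); the default 0 is unreachable (guarded by the membership test)
      let i : Int := ((PySem.List.index? rec prop).getD 0 : Nat)
      if i ≤ prev then true else pvGoB rec i rest
    else pvGoB rec prev rest

def check_resource_property_order_py_alt (resource : List (String × String)) : Bool :=
  let recommended_order : List String :=
    ["type", "apiVersion", "name", "location", "dependsOn", "properties", "resources"]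
  pvGoB recommended_order (-1) (PySem.List.dedup (resource.map Prod.fst))

-- ===== PRECONDITION & SPEC =====
def Spec_check_resource_property_order_py (resource : List (String × String)) (out : Bool) : Prop := out = check_resource_property_order_py_alt resource
instance (resource : List (String × String)) (out : Bool) : Decidable (Spec_check_resource_property_order_py resource out) := by unfold Spec_check_resource_property_order_py; infer_instance

-- ===== CLAIM (what is proved, stated in full; the proofs are below) =====
def Claim_equal_check_resource_property_order_py : Prop := ∀ (resource : List (String × String)), Dom_check_resource_property_order_py resource → Spec_check_resource_property_order_py resource (check_resource_property_order_py resource)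

-- ===== LEMMAS AND PROOFS =====

def pvRec : List String :=
  ["type", "apiVersion", "name", "location", "dependsOn", "properties", "resources"]

def pvIdxI (p : String) : Int := (((PySem.List.index? pvRec p).getD 0 : Nat) : Int)

theorem pv_foldl_filter (P : String → Prop) [DecidablePred P] (l acc : List String) :
    l.foldl (fun acc p => if P p then acc ++ [p] else acc) acc
      = acc ++ l.filter (fun p => decide (P p)) := by
  induction l generalizing acc with
  | nil => simp
  | cons x t ih =>
    by_cases h : P x <;> simp [List.foldl_cons, h, ih]

theorem pv_go_false_iff (prev : Int) (ks : List String) :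
    pvGoB pvRec prev ks = false ↔
      List.IsChain (· < ·) (prev :: (ks.filter (fun p => decide (p ∈ pvRec))).map pvIdxI) := by
  induction ks generalizing prev with
  | nil => simp [pvGoB]
  | cons p rest ih =>
    by_cases hp : p ∈ pvRec
    · simp only [pvGoB, List.filter_cons, hp, decide_true, if_pos, List.map_cons,
        List.isChain_cons_cons]
      rw [show ((((PySem.List.index? pvRec p).getD 0 : Nat)) : Int) = pvIdxI p from rfl]
      by_cases hle : pvIdxI p ≤ prev
      · rw [if_pos hle]
        simp only [Bool.true_eq_false, false_iff]
        rintro ⟨hlt, -⟩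
        omega
      · rw [if_neg hle]
        rw [ih (pvIdxI p)]
        constructor
        · intro h; exact ⟨by omega, h⟩
        · intro h; exact h.2
    · simp only [pvGoB, List.filter_cons, hp, decide_false]
      simpa using ih prev

theorem pv_rec_pairwise : pvRec.Pairwise (fun a b => pvIdxI a < pvIdxI b) := by decide

theorem pv_main (ks : List String) (hnd : ks.Nodup) :
    ks.filter (fun p => decide (p ∈ pvRec))
        = pvRec.filter (fun p => decide (p ∈ ks.filter (fun q => decide (q ∈ pvRec))))
      ↔ List.IsChain (· < ·) ((ks.filter (fun p => decide (p ∈ pvRec))).map pvIdxI) := by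
  rw [List.isChain_map]
  haveI : Trans (fun a b : String => pvIdxI a < pvIdxI b)
      (fun a b : String => pvIdxI a < pvIdxI b) (fun a b : String => pvIdxI a < pvIdxI b) :=
    ⟨fun hab hbc => by omega⟩
  rw [List.isChain_iff_pairwise]
  constructor
  · intro heq
    rw [heq]
    exact List.Pairwise.filter _ pv_rec_pairwise
  · intro hpw
    have hnpr : (ks.filter (fun p => decide (p ∈ pvRec))).Nodup := hnd.filter _
    have hnf : (pvRec.filter
        (fun p => decide (p ∈ ks.filter (fun q => decide (q ∈ pvRec))))).Nodup :=
      (show pvRec.Nodup by decide).filter _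
    have hperm : List.Perm (ks.filter (fun p => decide (p ∈ pvRec)))
        (pvRec.filter (fun p => decide (p ∈ ks.filter (fun q => decide (q ∈ pvRec))))) := by
      rw [List.perm_ext_iff_of_nodup hnpr hnf]
      intro a
      simp only [List.mem_filter, decide_eq_true_eq]
      constructor
      · intro ha
        exact ⟨ha.2, ha⟩
      · intro ha
        exact ha.2
    haveI : Std.Antisymm (fun a b : String => pvIdxI a < pvIdxI b) :=
      ⟨fun a b hab hba => absurd hba (by omega)⟩
    exact List.Perm.eq_of_pairwise' hpw (List.Pairwise.filter _ pv_rec_pairwise) hperm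

theorem pv_chain_neg_one (l : List String) :
    List.IsChain (· < ·) ((-1 : Int) :: l.map pvIdxI) ↔ List.IsChain (· < ·) (l.map pvIdxI) := by
  cases l with
  | nil => simp
  | cons p t =>
    rw [List.map_cons, List.isChain_cons_cons]
    have : (-1 : Int) < pvIdxI p := by unfold pvIdxI; omega
    simp [this]

-- ===== VERDICT (by name: the statement is the Claim_ definition above) =====
theorem check_resource_property_order_py_spec : Claim_equal_check_resource_property_order_py := by
  intro resource _
  unfold Spec_check_resource_property_order_py
  unfold check_resource_property_order_py check_resource_property_order_py_alt
  simp only [pv_foldl_filter, List.nil_append]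
  set ks := PySem.List.dedup (resource.map Prod.fst) with hks
  have hnd : ks.Nodup := PySem.List.nodup_dedup _
  have hrec : (["type", "apiVersion", "name", "location", "dependsOn", "properties", "resources"] : List String) = pvRec := rfl
  rw [hrec]
  have hB := pv_go_false_iff (-1) ks
  rw [pv_chain_neg_one] at hB
  have hA := pv_main ks hnd
  by_cases heq : ks.filter (fun p => decide (p ∈ pvRec))
      = pvRec.filter (fun p => decide (p ∈ ks.filter (fun q => decide (q ∈ pvRec))))
  · rw [if_neg (by simpa using heq)]
    exact (hB.mpr (hA.mp heq)).symm
  · rw [if_pos (by simpa using heq)]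
    rcases h : pvGoB pvRec (-1) ks with _ | _
    · exact absurd (hA.mpr (hB.mp h)) heq
    · rfl
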